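-- pv_equiv track=rewrite | github.com/jingof/Python-Coding-Projects | LeastCarCount.py | solution
-- ===== SOURCE A (Python) =====
-- def solution(P,S):
--     people = 0
--     totalPeople = sum(P)
--     neededCars = 0
--
--     while(True):
--         maxSeat = max(S)
--         ind = S.index(maxSeat)
--         people += maxSeat
--         neededCars += 1
--         if people >= totalPeople:
--             break
--         if type(ind) == list:
--             del(S[ind[0]])
--         else:
--             del(S[ind])
--     return neededCars
-- ===== SOURCE B (Python) =====
-- def solution(P, S):
--     # Sort seat counts descending once, then accumulate until the total is covered.
--     # Does not mutate S (A deletes used entries from S in place).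
--     total = sum(P)
--     people = 0
--     cars = 0
--     for seats in sorted(S, reverse=True):
--         people += seats
--         cars += 1
--         if people >= total:
--             return cars
--     return cars  # seats cannot cover total: A raises ValueError here (outside Pre_)
-- ===== Notes on version B (the rewrite author's own statement) =====
-- stated objective: alternative
-- what changed: A repeatedly scans S with max()/index() and deletes the used maximum in place, mutating S; B sorts S descending once and accumulates a prefix sum until it covers sum(P), without mutating S.
import Mathlib
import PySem

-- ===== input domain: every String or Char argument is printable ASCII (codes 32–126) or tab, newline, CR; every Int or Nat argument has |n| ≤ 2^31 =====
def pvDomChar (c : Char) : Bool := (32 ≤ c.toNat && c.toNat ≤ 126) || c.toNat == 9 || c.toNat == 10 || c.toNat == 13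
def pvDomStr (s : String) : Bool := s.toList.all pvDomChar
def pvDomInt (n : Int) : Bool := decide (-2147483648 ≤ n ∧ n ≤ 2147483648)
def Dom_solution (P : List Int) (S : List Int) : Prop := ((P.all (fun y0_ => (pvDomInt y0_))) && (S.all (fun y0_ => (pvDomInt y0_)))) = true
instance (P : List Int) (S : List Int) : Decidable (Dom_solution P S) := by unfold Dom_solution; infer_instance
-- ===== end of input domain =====

-- B sorts the seat list descending once and scans a prefix sum, instead of A's repeated
-- max/index/del passes over S (A also mutates S in place; the claim is about the return value only).


-- ===== PORT A =====
-- while True: take max(S), add it, count a car; break if covered, else delete that max from S.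
-- Fuel = S.length + 1 bounds the iterations (each non-break step deletes one element);
-- the `none`/fuel-0 branches correspond to Python's ValueError from max([]) (excluded by Pre_).
def solutionLoop : Nat → List Int → Int → Int → Int → Int
  | 0, _, _, _, _ => 0  -- unreachable under Pre_ (Python would have raised)
  | fuel + 1, S, total, people, cars =>
    match PySem.List.max? S (fun x => x) with
    | none => 0          -- max([]) raises ValueError (outside Pre_)
    | some m =>
      let people := people + m
      let cars := cars + 1
      if total ≤ people then cars
      else solutionLoop fuel (S.erase m) total people cars

def solution (P : List Int) (S : List Int) : Int :=
  solutionLoop (S.length + 1) S P.sum 0 0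

-- ===== PORT B =====
-- one descending sort, then a single prefix-sum scan
def solutionScan : List Int → Int → Int → Int → Int
  | [], _, _, cars => cars
  | s :: rest, total, people, cars =>
    let people := people + s
    let cars := cars + 1
    if total ≤ people then cars
    else solutionScan rest total people cars

def solution_alt (P : List Int) (S : List Int) : Int :=
  solutionScan (PySem.List.sorted S (fun x => x) true) P.sum 0 0

-- ===== PRECONDITION & SPEC =====
-- Pre_ excludes exactly the inputs where A raises ValueError (max() on an empty/exhausted S):
-- it holds iff some k of the largest seat counts already cover sum(P).
def Pre_solution (P : List Int) (S : List Int) : Prop :=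
  ∃ k : Nat, k < S.length ∧ P.sum ≤ ((PySem.List.sorted S (fun x => x) true).take (k + 1)).sum
instance (P : List Int) (S : List Int) : Decidable (Pre_solution P S) := by
  unfold Pre_solution; infer_instance
def pvWitness_solution : List Int × List Int := ([3], [2, 2])
def Spec_solution (P : List Int) (S : List Int) (out : Int) : Prop := out = solution_alt P S
instance (P : List Int) (S : List Int) (out : Int) : Decidable (Spec_solution P S out) := by unfold Spec_solution; infer_instance

-- ===== CLAIM (what is proved, stated in full; the proofs are below) =====
def Claim_equal_solution : Prop := ∀ (P : List Int) (S : List Int), Dom_solution P S → Pre_solution P S → Spec_solution P S (solution P S)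

-- ===== LEMMAS AND PROOFS =====

-- the first maximum heads the descending sort, the rest is the descending sort of the erase
lemma sortedDesc_max_cons (S : List Int) (m : Int)
    (hm : PySem.List.max? S (fun x => x) = some m) :
    PySem.List.sorted S (fun x => x) true = m :: PySem.List.sorted (S.erase m) (fun x => x) true := by
  have hmem : m ∈ S := PySem.List.max?_mem hm
  have hmax : ∀ y ∈ S, y ≤ m := by
    intro y hy
    simpa using PySem.List.max?_isMax hm y hy
  -- both sides are Sorted (· ≥ ·) and permutations of S
  have hperm1 : (PySem.List.sorted S (fun x => x) true).Perm S :=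
    PySem.List.sorted_perm S (fun x => x) true
  have hperm2 : (m :: PySem.List.sorted (S.erase m) (fun x => x) true).Perm S := by
    have h1 : (PySem.List.sorted (S.erase m) (fun x => x) true).Perm (S.erase m) :=
      PySem.List.sorted_perm (S.erase m) (fun x => x) true
    exact (h1.cons m).trans (List.perm_cons_erase hmem).symm
  have hs1 : (PySem.List.sorted S (fun x => x) true).Pairwise (fun a b => b ≤ a) :=
    PySem.List.sorted_pairwise_rev (xs := S) (key := fun x => x)
  have hs2 : (m :: PySem.List.sorted (S.erase m) (fun x => x) true).Pairwise (fun a b => b ≤ a) := by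
    refine List.Pairwise.cons ?_ ?_
    · intro y hy
      have : y ∈ S.erase m := (PySem.List.mem_sorted (S.erase m) (fun x => x) true y).1 hy
      exact hmax y (List.mem_of_mem_erase this)
    · exact PySem.List.sorted_pairwise_rev (xs := S.erase m) (key := fun x => x)
  exact (hperm1.trans hperm2.symm).eq_of_pairwise (fun a b _ _ h1 h2 => le_antisymm h2 h1) hs1 hs2

-- main invariant: with enough fuel and a reachable total, A's max/erase loop computes
-- exactly B's scan over the descending sort
lemma loop_eq_scan (fuel : Nat) :
    ∀ (S : List Int) (total people cars : Int), S.length < fuel →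
    (∃ k : Nat, k < S.length ∧
      total ≤ people + ((PySem.List.sorted S (fun x => x) true).take (k + 1)).sum) →
    solutionLoop fuel S total people cars =
      solutionScan (PySem.List.sorted S (fun x => x) true) total people cars := by
  induction fuel with
  | zero => intro S total people cars h; omega
  | succ fuel ih =>
    intro S total people cars hlen hreach
    obtain ⟨k, hk, hsum⟩ := hreach
    have hS : S ≠ [] := by intro h; subst h; simp at hk
    obtain ⟨m, hm⟩ : ∃ m, PySem.List.max? S (fun x => x) = some m := by
      cases hmx : PySem.List.max? S (fun x => x) with
      | none => exact absurd ((PySem.List.max?_eq_none_iff S (fun x => x)).1 hmx) hS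
      | some m => exact ⟨m, rfl⟩
    have hcons := sortedDesc_max_cons S m hm
    have hmem : m ∈ S := PySem.List.max?_mem hm
    show solutionLoop (fuel + 1) S total people cars = _
    rw [hcons]
    simp only [solutionLoop, hm, solutionScan]
    by_cases hbr : total ≤ people + m
    · simp [hbr]
    · simp only [if_neg hbr]
      have hk1 : 1 ≤ k := by
        by_contra h
        have : k = 0 := by omega
        subst this
        rw [hcons] at hsum
        simp at hsum
        omega
      have hlen' : (S.erase m).length = S.length - 1 := List.length_erase_of_mem hmem
      refine ih (S.erase m) total (people + m) (cars + 1) (by omega) ?_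
      refine ⟨k - 1, by omega, ?_⟩
      rw [hcons] at hsum
      have hkk : k - 1 + 1 = k := by omega
      rw [hkk]
      have : ((m :: PySem.List.sorted (S.erase m) (fun x => x) true).take (k + 1)).sum
          = m + ((PySem.List.sorted (S.erase m) (fun x => x) true).take k).sum := by
        simp [List.take_succ_cons]
      rw [this] at hsum
      linarith

-- ===== VERDICT (by name: the statement is the Claim_ definition above) =====
theorem solution_spec : Claim_equal_solution := by
  intro P S _hdom hpre
  unfold Spec_solution solution solution_alt
  obtain ⟨k, hk, hsum⟩ := hpre
  exact loop_eq_scan (S.length + 1) S P.sum 0 0 (by omega) ⟨k, hk, by simpa using hsum⟩
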